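-- pv_equiv track=rewrite | github.com/ivan-zlatev/aoc | 2021/19/19.py | getUniquePoints
-- ===== SOURCE A (Python) =====
-- def getUniquePoints(grid):
--     result = []
--     for val in grid.values():
--         for point in val[0]:
--             tmp = [x + y for x, y in zip(point, val[1])]
--             if tmp not in result:
--                 result.append(tmp)
--     return len(result)
-- ===== SOURCE B (Python) =====
-- def getUniquePoints(grid):
--     # Flatten all translated points, sort them, then count distinct
--     # elements in one run-length sweep over the sorted list.
--     pts = [[x + y for x, y in zip(point, val[1])]
--            for val in grid.values() for point in val[0]]
--     pts.sort()
--     if not pts: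
--         return 0
--     count = 1
--     for i in range(1, len(pts)):
--         if pts[i] != pts[i - 1]:
--             count += 1
--     return count
-- ===== Notes on version B (the rewrite author's own statement) =====
-- stated objective: faster
-- what changed: Replaces the quadratic append-if-not-already-present membership scan with flatten + sort + one run-length pass counting distinct adjacent elements.
import Mathlib
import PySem

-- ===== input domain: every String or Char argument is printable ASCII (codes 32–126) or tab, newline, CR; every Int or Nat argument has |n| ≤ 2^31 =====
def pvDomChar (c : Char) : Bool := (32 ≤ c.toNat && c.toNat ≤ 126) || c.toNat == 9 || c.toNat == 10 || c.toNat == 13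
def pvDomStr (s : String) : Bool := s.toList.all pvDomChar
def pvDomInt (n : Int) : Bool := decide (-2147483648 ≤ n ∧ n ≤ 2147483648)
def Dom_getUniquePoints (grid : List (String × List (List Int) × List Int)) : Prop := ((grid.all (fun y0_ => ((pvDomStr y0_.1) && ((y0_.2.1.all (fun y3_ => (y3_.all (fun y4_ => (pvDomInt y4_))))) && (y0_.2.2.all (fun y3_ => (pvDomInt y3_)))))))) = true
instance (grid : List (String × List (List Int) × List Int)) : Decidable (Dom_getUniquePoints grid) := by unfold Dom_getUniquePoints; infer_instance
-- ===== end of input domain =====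

-- B replaces A's quadratic append-if-not-seen membership scan by flatten + sort +
-- one run-length sweep counting distinct adjacent elements (objective: faster).

-- ===== PORT A =====
-- [x + y for x, y in zip(point, off)]
def pvTrans (point off : List Int) : List Int :=
  (point.zip off).map (fun p => p.1 + p.2)

def getUniquePoints (grid : List (String × List (List Int) × List Int)) : Int :=
  ((grid.foldl (fun result val =>
      val.2.1.foldl (fun r point =>
        let tmp := pvTrans point val.2.2
        if tmp ∈ r then r else r ++ [tmp]) result) []).length : Int)

-- ===== PORT B =====
-- the run-length sweep: adds 1 whenever the current element differs from the previous
def pvCountNew (prev : List Int) : List (List Int) → Int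
  | [] => 0
  | y :: ys => (if y ≠ prev then 1 else 0) + pvCountNew y ys

def getUniquePoints_alt (grid : List (String × List (List Int) × List Int)) : Int :=
  let pts := grid.flatMap (fun val => val.2.1.map (fun point => pvTrans point val.2.2))
  match PySem.List.sorted pts (fun x => x) false with
  | [] => 0
  | x :: rest => 1 + pvCountNew x rest

-- ===== PRECONDITION & SPEC =====
def Spec_getUniquePoints (grid : List (String × List (List Int) × List Int)) (out : Int) : Prop := out = getUniquePoints_alt grid
instance (grid : List (String × List (List Int) × List Int)) (out : Int) : Decidable (Spec_getUniquePoints grid out) := by unfold Spec_getUniquePoints; infer_instance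

-- ===== CLAIM (what is proved, stated in full; the proofs are below) =====
def Claim_equal_getUniquePoints : Prop := ∀ (grid : List (String × List (List Int) × List Int)), Dom_getUniquePoints grid → Spec_getUniquePoints grid (getUniquePoints grid)

-- ===== LEMMAS AND PROOFS =====

-- A's seen-list step
def pvStep (r : List (List Int)) (p : List Int) : List (List Int) :=
  if p ∈ r then r else r ++ [p]

def pvPts (grid : List (String × List (List Int) × List Int)) : List (List Int) :=
  grid.flatMap (fun val => val.2.1.map (fun point => pvTrans point val.2.2))

-- A's nested loops are one fold of pvStep over the flattened point list
theorem pvA_foldl (grid : List (String × List (List Int) × List Int)) (r : List (List Int)) :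
    grid.foldl (fun result val =>
      val.2.1.foldl (fun r point =>
        let tmp := pvTrans point val.2.2
        if tmp ∈ r then r else r ++ [tmp]) result) r
    = (pvPts grid).foldl pvStep r := by
  induction grid generalizing r with
  | nil => simp [pvPts]
  | cons v t ih =>
      simp only [List.foldl_cons, pvPts, List.flatMap_cons, List.foldl_append, List.foldl_map]
      rw [ih]
      congr 1

-- invariant of the fold of pvStep: result stays nodup and its element set grows by pts
theorem pvStep_inv (pts : List (List Int)) (r : List (List Int)) (hr : r.Nodup) :
    (pts.foldl pvStep r).Nodup ∧ (pts.foldl pvStep r).toFinset = r.toFinset ∪ pts.toFinset := by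
  induction pts generalizing r with
  | nil => simpa using hr
  | cons p t ih =>
      simp only [List.foldl_cons, pvStep]
      by_cases hp : p ∈ r
      · simp only [if_pos hp]
        obtain ⟨h1, h2⟩ := ih r hr
        refine ⟨h1, ?_⟩
        rw [h2]
        ext z
        simp only [Finset.mem_union, List.mem_toFinset, List.toFinset_cons, Finset.mem_insert]
        constructor
        · tauto
        · rintro (h | h | h)
          · exact Or.inl h
          · subst h; exact Or.inl hp
          · exact Or.inr h
      · simp only [if_neg hp]
        have hnd : (r ++ [p]).Nodup := by
          simp [List.nodup_append, hr]
          exact fun a ha he => hp (he ▸ ha)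
        obtain ⟨h1, h2⟩ := ih (r ++ [p]) hnd
        refine ⟨h1, ?_⟩
        rw [h2]
        ext z
        simp only [Finset.mem_union, List.mem_toFinset, List.mem_append, List.mem_singleton,
          List.toFinset_cons, Finset.mem_insert]
        tauto

-- A returns the number of distinct translated points
theorem pvA_card (grid : List (String × List (List Int) × List Int)) :
    getUniquePoints grid = ((pvPts grid).toFinset.card : Int) := by
  unfold getUniquePoints
  rw [pvA_foldl]
  obtain ⟨h1, h2⟩ := pvStep_inv (pvPts grid) [] (by simp)
  rw [← List.toFinset_card_of_nodup h1, h2]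
  simp

-- the run-length sweep on a sorted list counts the distinct elements
theorem pvCountNew_sorted (rest : List (List Int)) :
    ∀ x : List Int, (x :: rest).Pairwise (· ≤ ·) →
      1 + pvCountNew x rest = (((x :: rest).toFinset.card : Nat) : Int) := by
  induction rest with
  | nil => intro x _; simp [pvCountNew]
  | cons y t ih =>
      intro x hp
      have hxy : x ≤ y := (List.pairwise_cons.mp hp).1 y (by simp)
      have hp' : (y :: t).Pairwise (· ≤ ·) := (List.pairwise_cons.mp hp).2
      by_cases hxe : x = y
      · subst hxe
        simp only [pvCountNew, ne_eq, not_true_eq_false, if_false, zero_add]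
        rw [ih x hp']
        congr 1
        simp [List.toFinset_cons]
      · have hnot : x ∉ (y :: t) := by
          intro hmem
          have hle : ∀ z ∈ (y :: t), y ≤ z := by
            intro z hz
            rcases List.mem_cons.mp hz with h | h
            · exact le_of_eq h.symm
            · exact (List.pairwise_cons.mp hp').1 z h
          have : y ≤ x := hle x hmem
          exact hxe (le_antisymm hxy this)
        have hyx : ¬ (y = x) := fun h => hxe h.symm
        have : pvCountNew x (y :: t) = 1 + pvCountNew y t := by
          simp [pvCountNew, hyx]
        rw [this, ih y hp']
        have hcard : ((x :: y :: t).toFinset.card : Nat) = (y :: t).toFinset.card + 1 := by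
          rw [List.toFinset_cons, Finset.card_insert_of_notMem (by simpa using hnot)]
        rw [hcard]
        push_cast
        ring

-- inserting with the strict-less test keeps the list sorted
theorem pvInsert_pairwise (x : List Int) (ys : List (List Int))
    (h : ys.Pairwise (· ≤ ·)) :
    (PySem.List.insertBy (fun a b => decide (a < b)) x ys).Pairwise (· ≤ ·) := by
  induction ys with
  | nil => simp [PySem.List.insertBy]
  | cons y t ih =>
      rw [List.pairwise_cons] at h
      obtain ⟨hy, ht⟩ := h
      by_cases hxy : x < y
      · have he : PySem.List.insertBy (fun a b => decide (a < b)) x (y :: t)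
            = x :: y :: t := by
          simp [PySem.List.insertBy, hxy]
        rw [he, List.pairwise_cons]
        constructor
        · intro z hz
          rcases List.mem_cons.mp hz with h | h
          · exact le_of_lt (h ▸ hxy)
          · exact le_of_lt (lt_of_lt_of_le hxy (hy z h))
        · exact List.pairwise_cons.mpr ⟨hy, ht⟩
      · have he : PySem.List.insertBy (fun a b => decide (a < b)) x (y :: t)
            = y :: PySem.List.insertBy (fun a b => decide (a < b)) x t := by
          simp [PySem.List.insertBy, hxy]
        rw [he, List.pairwise_cons]
        refine ⟨?_, ih ht⟩
        intro z hz
        rcases (PySem.List.mem_insertBy _ x z t).mp hz with h | h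
        · subst h; exact le_of_not_gt hxy
        · exact hy z h

-- the insertion-sort fold keeps the accumulator sorted
theorem pvFoldl_pairwise (xs : List (List Int)) (acc : List (List Int))
    (h : acc.Pairwise (· ≤ ·)) :
    (xs.foldl (fun acc x => PySem.List.insertBy (fun a b => decide (a < b)) x acc) acc).Pairwise (· ≤ ·) := by
  induction xs generalizing acc with
  | nil => simpa
  | cons x t ih => exact ih _ (pvInsert_pairwise x acc h)

-- sorted(xs) is sorted
theorem pvSorted_pairwise (xs : List (List Int)) :
    (PySem.List.sorted xs (fun x => x) false).Pairwise (· ≤ ·) := by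
  rw [PySem.List.sorted_eq_foldl_insertBy]
  exact pvFoldl_pairwise xs [] (by simp)

-- B returns the number of distinct translated points too
theorem pvB_card (grid : List (String × List (List Int) × List Int)) :
    getUniquePoints_alt grid = ((pvPts grid).toFinset.card : Int) := by
  have hperm : (PySem.List.sorted (pvPts grid) (fun x => x) false).Perm (pvPts grid) :=
    PySem.List.sorted_perm _ _ _
  have hfs : (PySem.List.sorted (pvPts grid) (fun x => x) false).toFinset
      = (pvPts grid).toFinset := by
    ext z
    simp only [List.mem_toFinset]
    exact hperm.mem_iff
  show (match PySem.List.sorted (pvPts grid) (fun x => x) false with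
        | [] => (0 : Int)
        | x :: rest => 1 + pvCountNew x rest) = ((pvPts grid).toFinset.card : Int)
  cases hs : PySem.List.sorted (pvPts grid) (fun x => x) false with
  | nil =>
      have h0' : pvPts grid = [] := by
        have := hperm
        rw [hs] at this
        exact this.symm.eq_nil
      rw [h0']
      simp
  | cons x rest =>
      have hpw : (x :: rest).Pairwise (· ≤ ·) := by
        have h := pvSorted_pairwise (pvPts grid)
        rw [hs] at h
        exact h
      simp only []
      rw [pvCountNew_sorted rest x hpw, ← hfs, hs]

-- ===== VERDICT (by name: the statement is the Claim_ definition above) =====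
theorem getUniquePoints_spec : Claim_equal_getUniquePoints := by
  intro grid _
  unfold Spec_getUniquePoints
  rw [pvA_card, pvB_card]
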